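-- pv_equiv track=rewrite | github.com/TeamSparta-Inc/sparta-algorithm-study | programmers/서버 증설 횟수/jsyun.py | solution
-- ===== SOURCE A (Python) =====
-- def solution(players, m, k):
--     answer = 0
--
--     servers = [0] * len(players)
--
--     for t, player in enumerate(players):
--         servers_required = player // m
--         if servers[t] < servers_required:
--             shortage = servers_required - servers[t]
--             servers[t:t+k] = [i + shortage for i in servers[t:t+k]]
--             answer += shortage
--
--     return answer
-- ===== SOURCE B (Python) =====
-- def solution(players, m, k):
--     answer = 0
--     active = 0                            # servers currently running
--     expire = [0] * (len(players) + 1)     # expire[t] = servers that shut down before step t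
--     for t, player in enumerate(players):
--         active -= expire[t]
--         need = player // m
--         if active < need:
--             add = need - active
--             answer += add
--             if k > 0:                     # a server lasting <= 0 steps is never active
--                 active += add
--                 e = t + k
--                 if e < len(expire):
--                     expire[e] += add
--     return answer
-- ===== Notes on version B (the rewrite author's own statement) =====
-- stated objective: alternative
-- what changed: Replaces A's per-step slice rewrite of a servers array (up to k list writes per timestep) by a running count of active servers with an expiration difference-array, one write per increment; intended as asymptotically faster (O(n) vs O(n*k)), but a timing run's measurements varied (about 1.2x-2.3x at its largest sizes, depending on the input family), so no speed is claimed.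
-- intended difference: For k < 0 (a nonsensical server lifetime) with two positive demands i < j such that i+k < 0 and j-i < n+k, A's negative slice bound t+k wraps around and lets servers bought at step i wrongly cover step j (A returns a smaller count), while B counts every positive demand since a server lasting <= 0 steps is never active, which is the intended reading of the duration parameter. — e.g. on solution([3, 3, 3], 1, -1): A returns 6, B returns 9
import Mathlib
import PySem

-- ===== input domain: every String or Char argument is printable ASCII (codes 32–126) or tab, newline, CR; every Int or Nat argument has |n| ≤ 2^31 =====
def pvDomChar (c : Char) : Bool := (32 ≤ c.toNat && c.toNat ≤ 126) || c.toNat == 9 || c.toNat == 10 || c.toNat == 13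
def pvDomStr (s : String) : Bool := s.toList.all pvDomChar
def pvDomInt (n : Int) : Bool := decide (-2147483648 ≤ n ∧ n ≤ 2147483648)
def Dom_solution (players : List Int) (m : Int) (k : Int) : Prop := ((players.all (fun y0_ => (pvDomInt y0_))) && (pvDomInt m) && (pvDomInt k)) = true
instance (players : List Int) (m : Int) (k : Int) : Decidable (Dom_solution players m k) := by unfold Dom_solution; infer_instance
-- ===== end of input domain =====

-- B replaces A's per-step slice rewrite of the servers array by a running active-server count
-- with an expiration difference-array (one write per increment) — a different algorithm,
-- intended as faster for large k; a timing run's measurements varied, so no speed is claimed.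

-- ===== PORT A =====
-- Python slice assignment xs[a:b] = v (exact index rule: start clamped into [0,len],
-- stop clamped likewise and then raised to at least the start).
def pySetSlice (xs : List Int) (a b : Int) (v : List Int) : List Int :=
  let i := PySem.List.clampIdx xs.length a
  let j := max (PySem.List.clampIdx xs.length b) i
  xs.take i ++ v ++ xs.drop j

def solution (players : List Int) (m : Int) (k : Int) : Int :=
  ((PySem.List.enumerate players 0).foldl
    (fun (st : Int × List Int) (tp : Int × Int) =>
      let answer := st.1
      let servers := st.2
      let t := tp.1
      let player := tp.2
      let servers_required := PySem.Int.floordiv player m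
      -- servers[t]: t is the enumerate index, always in range, so the default is never used
      let cur := PySem.List.pyGetD servers t 0
      if cur < servers_required then
        let shortage := servers_required - cur
        (answer + shortage,
         pySetSlice servers t (t + k)
           ((PySem.List.slice servers (some t) (some (t + k))).map (fun i => i + shortage)))
      else st)
    (0, List.replicate players.length 0)).1

-- ===== PORT B =====
def solution_alt (players : List Int) (m : Int) (k : Int) : Int :=
  ((PySem.List.enumerate players 0).foldl
    (fun (st : Int × Int × List Int) (tp : Int × Int) =>
      let answer := st.1
      let expire := st.2.2
      -- expire[t]: t < len(players) < len(expire), always in range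
      let active := st.2.1 - PySem.List.pyGetD expire tp.1 0
      let need := PySem.Int.floordiv tp.2 m
      if active < need then
        let add := need - active
        if 0 < k then
          let e := tp.1 + k
          (answer + add, active + add,
           if e < (expire.length : Int) then
             expire.set e.toNat (PySem.List.pyGetD expire e 0 + add)
           else expire)
        else (answer + add, active, expire)
      else (answer, active, expire))
    (0, 0, List.replicate (players.length + 1) 0)).1

-- ===== PRECONDITION & SPEC =====
-- Pre_ excludes only m = 0, where the Python A raises ZeroDivisionError on `player // m`.
def Pre_solution (players : List Int) (m : Int) (k : Int) : Prop := m ≠ 0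
instance (players : List Int) (m : Int) (k : Int) : Decidable (Pre_solution players m k) := by unfold Pre_solution; infer_instance
def pvWitness_solution : List Int × Int × Int := ([4, 3], 2, 1)

-- For k < 0 (a nonsensical server lifetime) with two positive demands i < j such that i+k < 0 and
-- j-i < n+k, A's negative slice bound t+k wraps around and lets servers bought at step i wrongly
-- cover step j (A returns a smaller count), while B counts every positive demand, since a server
-- lasting ≤ 0 steps is never active — the intended reading of the duration parameter.
def D_solution (players : List Int) (m : Int) (k : Int) : Prop :=
  k < 0 ∧ ∃ i < players.length, ∃ j < players.length, i < j ∧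
    (i : Int) + k < 0 ∧ (j : Int) - (i : Int) < (players.length : Int) + k ∧
    0 < PySem.Int.floordiv (players.getD i 0) m ∧ 0 < PySem.Int.floordiv (players.getD j 0) m
instance (players : List Int) (m : Int) (k : Int) : Decidable (D_solution players m k) := by unfold D_solution; infer_instance

def Spec_solution (players : List Int) (m : Int) (k : Int) (out : Int) : Prop :=
  ¬ D_solution players m k → out = solution_alt players m k
instance (players : List Int) (m : Int) (k : Int) (out : Int) : Decidable (Spec_solution players m k out) := by unfold Spec_solution; infer_instance

def pvDiffWitness_solution : List Int × Int × Int := ([3, 3, 3], 1, -1)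
def pvDiffWitnessOut_solution : Int × Int := (6, 9)

-- ===== CLAIM (what is proved, stated in full; the proofs are below) =====
def Claim_unchanged_solution : Prop := ∀ (players : List Int) (m : Int) (k : Int), Dom_solution players m k → Pre_solution players m k → Spec_solution players m k (solution players m k)
def Claim_changed_solution : Prop := Dom_solution (pvDiffWitness_solution.1) (pvDiffWitness_solution.2.1) (pvDiffWitness_solution.2.2) ∧ Pre_solution (pvDiffWitness_solution.1) (pvDiffWitness_solution.2.1) (pvDiffWitness_solution.2.2) ∧ D_solution (pvDiffWitness_solution.1) (pvDiffWitness_solution.2.1) (pvDiffWitness_solution.2.2) ∧ solution (pvDiffWitness_solution.1) (pvDiffWitness_solution.2.1) (pvDiffWitness_solution.2.2) = pvDiffWitnessOut_solution.1 ∧ solution_alt (pvDiffWitness_solution.1) (pvDiffWitness_solution.2.1) (pvDiffWitness_solution.2.2) = pvDiffWitnessOut_solution.2 ∧ pvDiffWitnessOut_solution.1 ≠ pvDiffWitnessOut_solution.2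

def Claim_exact_solution : Prop := ∀ (players : List Int) (m : Int) (k : Int), Dom_solution players m k → Pre_solution players m k → D_solution players m k → solution players m k ≠ solution_alt players m k

-- ===== LEMMAS AND PROOFS =====

-- add v to the first w entries of a list
def bump : Nat → Int → List Int → List Int
  | 0, _, xs => xs
  | _ + 1, _, [] => []
  | w + 1, v, x :: xs => (x + v) :: bump w v xs

-- the running server counts seen from a running total c and the coming expiration entries
def decode : Int → List Int → List Int
  | _, [] => []
  | c, e :: es => (c - e) :: decode (c - e) es

-- what A's loop computes: cov is the servers suffix from position t, n the total length
def specA (m k : Int) (n : Nat) : Nat → List Int → List Int → Int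
  | _, [], _ => 0
  | t, p :: ps, cov =>
    let req := PySem.Int.floordiv p m
    let cur := cov.headD 0
    if cur < req then
      (req - cur) + specA m k n (t + 1) ps
        (bump (PySem.List.clampIdx n ((t : Int) + k) - t - 1) (req - cur) cov.tail)
    else specA m k n (t + 1) ps cov.tail

-- what B's loop computes: the same recursion with the constant window k-1
def specB (m k : Int) : List Int → List Int → Int
  | [], _ => 0
  | p :: ps, cov =>
    let req := PySem.Int.floordiv p m
    let cur := cov.headD 0
    if cur < req then
      (req - cur) + specB m k ps (bump (k - 1).toNat (req - cur) cov.tail)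
    else specB m k ps cov.tail

-- sum of the positive demands
def needSum (m : Int) : List Int → Int
  | [] => 0
  | p :: ps => (if 0 < PySem.Int.floordiv p m then PySem.Int.floordiv p m else 0) + needSum m ps

theorem bump_eq_append (w : Nat) (v : Int) (xs : List Int) :
    bump w v xs = (xs.take w).map (· + v) ++ xs.drop w := by
  induction xs generalizing w with
  | nil => cases w <;> simp [bump]
  | cons x xs ih => cases w with
    | zero => simp [bump]
    | succ w => simp [bump, ih]

theorem bump_length (w : Nat) (v : Int) (xs : List Int) : (bump w v xs).length = xs.length := by
  simp [bump_eq_append]; omega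

theorem bump_take (w : Nat) (v : Int) (xs : List Int) (c : Nat) :
    (bump w v xs).take c = bump w v (xs.take c) := by
  induction xs generalizing w c with
  | nil => cases w <;> simp [bump]
  | cons x xs ih =>
    cases w with
    | zero => simp [bump]
    | succ w => cases c with
      | zero => simp [bump]
      | succ c => simp [bump, ih]

theorem bump_all (w : Nat) (v : Int) (xs : List Int) (h : xs.length ≤ w) :
    bump w v xs = xs.map (· + v) := by
  simp [bump_eq_append, List.take_of_length_le h, List.drop_of_length_le h]

theorem bump_getD (w : Nat) (v : Int) (xs : List Int) (j : Nat) :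
    (bump w v xs).getD j 0 = if j < w ∧ j < xs.length then xs.getD j 0 + v else xs.getD j 0 := by
  induction xs generalizing w j with
  | nil => cases w <;> simp [bump]
  | cons x xs ih =>
    cases w with
    | zero => simp [bump]
    | succ w => cases j with
      | zero => simp [bump]
      | succ j => simpa [bump] using ih w j

theorem getD_eq_headD_drop (xs : List Int) (n : Nat) (d : Int) :
    xs.getD n d = (xs.drop n).headD d := by
  induction xs generalizing n with
  | nil => simp
  | cons x xs ih => cases n <;> simp [ih]

theorem drop_eq_getD_cons (xs : List Int) (t : Nat) (h : t < xs.length) :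
    xs.drop t = xs.getD t 0 :: xs.drop (t + 1) := by
  rw [List.drop_eq_getElem_cons h, List.getD_eq_getElem xs 0 h]

theorem tail_drop' (xs : List Int) (t : Nat) : (xs.drop t).tail = xs.drop (t + 1) := by
  rw [← List.drop_one, List.drop_drop]

theorem decode_replicate (c : Int) (l : Nat) :
    decode c (List.replicate l 0) = List.replicate l c := by
  induction l with
  | zero => rfl
  | succ l ih => simp [List.replicate_succ, decode, ih]

theorem decode_set_bump (es : List Int) (c v : Int) (w : Nat) :
    decode (c + v) (es.set w (es.getD w 0 + v)) = bump w v (decode c es) := by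
  induction es generalizing c w with
  | nil => cases w <;> simp [decode, bump]
  | cons e es ih =>
    cases w with
    | zero =>
      have h : c + v - (e + v) = c - e := by ring
      simp [decode, bump, h]
    | succ w =>
      have h : c + v - e = c - e + v := by ring
      rw [List.getD_cons_succ, List.set_cons_succ]
      simp only [decode, bump]
      rw [h, ih]

-- effect of A's slice assignment on length and on the suffix past position t
theorem setslice_spec (s : List Int) (t : Nat) (k v : Int) (ht : t < s.length) :
    (pySetSlice s (t : Int) ((t : Int) + k)
      ((PySem.List.slice s (some (t : Int)) (some ((t : Int) + k))).map (fun i => i + v))).length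
        = s.length
    ∧ (pySetSlice s (t : Int) ((t : Int) + k)
      ((PySem.List.slice s (some (t : Int)) (some ((t : Int) + k))).map (fun i => i + v))).drop (t + 1)
        = bump (PySem.List.clampIdx s.length ((t : Int) + k) - t - 1) v (s.drop (t + 1)) := by
  have hbn : PySem.List.clampIdx s.length ((t : Int) + k) ≤ s.length :=
    PySem.List.clampIdx_le _ _
  have ha : PySem.List.clampIdx s.length (t : Int) = t := by
    rw [PySem.List.clampIdx_natCast]; omega
  have hslice : PySem.List.slice s (some (t : Int)) (some ((t : Int) + k))
      = (s.drop t).take (PySem.List.clampIdx s.length ((t : Int) + k) - t) := by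
    simp only [PySem.List.slice, ha]
  generalize hB : PySem.List.clampIdx s.length ((t : Int) + k) = b at hslice hbn ⊢
  have hdropj : s.drop (max b t) = s.drop (t + (b - t)) := by
    rcases Nat.le_total b t with h | h
    · rw [Nat.max_eq_right h]; congr 1; omega
    · rw [Nat.max_eq_left h]; congr 1; omega
  have hmid : (((s.drop t).take (b - t)).map (fun i => i + v)).length = b - t := by
    simp; omega
  have hlen1 : (s.take t ++ ((s.drop t).take (b - t)).map (fun i => i + v)).length = t + (b - t) := by
    simp; omega
  constructor
  · simp only [pySetSlice, hslice, ha]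
    rw [hB, hdropj]
    simp
    omega
  · simp only [pySetSlice, hslice, ha]
    rw [hB, hdropj]
    rw [List.drop_append (l₁ := s.take t ++ ((s.drop t).take (b - t)).map (fun i => i + v))]
    rw [hlen1]
    rw [List.drop_append (l₁ := s.take t)]
    have h1 : (s.take t).drop (t + 1) = [] := by
      apply List.drop_of_length_le; simp
    have h2 : (s.take t).length = t := by simp; omega
    rw [h1, h2]
    have h3 : t + 1 - t = 1 := by omega
    rw [h3, List.nil_append]
    rcases Nat.eq_zero_or_pos (b - t) with hw0 | hw1
    · rw [hw0]
      simp only [List.take_zero, List.map_nil, List.drop_nil, Nat.add_zero, List.nil_append]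
      have h4 : t + 1 - t = 1 := by omega
      rw [h4, List.drop_drop]
      simp [bump]
    · have h4 : t + 1 - (t + (b - t)) = 0 := by omega
      rw [h4, List.drop_zero]
      rw [← List.map_drop, List.drop_take, List.drop_drop, bump_eq_append]
      have h5 : b - t - 1 = b - (t + 1) := by omega
      have h6 : t + 1 = 1 + t := by omega
      have h7 : s.drop (t + (b - t)) = (s.drop (1 + t)).drop (b - (t + 1)) := by
        rw [List.drop_drop]; congr 1; omega
      rw [h5, h6, h7]
      have h8 : b - (t + 1) = b - (1 + t) := by omega
      rw [h8]

-- A's loop from position t equals specA on the servers suffix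
theorem A_loop (m k : Int) (n : Nat) (ps : List Int) : ∀ (t : Nat) (a : Int) (s : List Int),
    s.length = n → n = t + ps.length →
    ((PySem.List.enumerate ps (t : Int)).foldl
      (fun (st : Int × List Int) (tp : Int × Int) =>
        let answer := st.1
        let servers := st.2
        let t := tp.1
        let player := tp.2
        let servers_required := PySem.Int.floordiv player m
        let cur := PySem.List.pyGetD servers t 0
        if cur < servers_required then
          let shortage := servers_required - cur
          (answer + shortage,
           pySetSlice servers t (t + k)
             ((PySem.List.slice servers (some t) (some (t + k))).map (fun i => i + shortage)))
        else st)
      (a, s)).1 = a + specA m k n t ps (s.drop t) := by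
  induction ps with
  | nil =>
    intro t a s h1 h2
    simp [PySem.List.enumerate, specA]
  | cons p ps ih =>
    intro t a s h1 h2
    have htn : t < s.length := by simp at h2; omega
    rw [PySem.List.enumerate_cons, List.foldl_cons]
    dsimp only
    have hcur : PySem.List.pyGetD s (t : Int) 0 = (s.drop t).headD 0 := by
      rw [PySem.List.pyGetD_natCast, getD_eq_headD_drop]
    rw [hcur]
    have hcast : (t : Int) + 1 = ((t + 1 : Nat) : Int) := by push_cast; ring
    by_cases hc : (s.drop t).headD 0 < PySem.Int.floordiv p m
    · rw [if_pos hc]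
      obtain ⟨hl, hd⟩ := setslice_spec s t k (PySem.Int.floordiv p m - (s.drop t).headD 0) htn
      rw [hcast, ih (t + 1) _ _ (by rw [hl]; exact h1) (by simp at h2 ⊢; omega)]
      rw [hd, h1]
      simp only [specA, if_pos hc, tail_drop']
      ring
    · rw [if_neg hc]
      rw [hcast, ih (t + 1) a s h1 (by simp at h2 ⊢; omega)]
      simp only [specA, if_neg hc, tail_drop']

-- B's loop from position t equals specB on the decoded coverage profile
theorem B_loop (m k : Int) (ps : List Int) : ∀ (t : Nat) (a c : Int) (E : List Int),
    E.length = t + ps.length + 1 →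
    ((PySem.List.enumerate ps (t : Int)).foldl
      (fun (st : Int × Int × List Int) (tp : Int × Int) =>
        let answer := st.1
        let expire := st.2.2
        let active := st.2.1 - PySem.List.pyGetD expire tp.1 0
        let need := PySem.Int.floordiv tp.2 m
        if active < need then
          let add := need - active
          if 0 < k then
            let e := tp.1 + k
            (answer + add, active + add,
             if e < (expire.length : Int) then
               expire.set e.toNat (PySem.List.pyGetD expire e 0 + add)
             else expire)
          else (answer + add, active, expire)
        else (answer, active, expire))
      (a, c, E)).1 = a + specB m k ps (decode c (E.drop t)) := by
  dsimp only
  induction ps with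
  | nil =>
    intro t a c E h1
    simp [PySem.List.enumerate, specB]
  | cons p ps ih =>
    intro t a c E h1
    have htn : t < E.length := by omega
    have hdropE : E.drop t = E.getD t 0 :: E.drop (t + 1) := drop_eq_getD_cons E t htn
    rw [PySem.List.enumerate_cons, List.foldl_cons]
    dsimp only
    rw [PySem.List.pyGetD_natCast]
    have hcast : (t : Int) + 1 = ((t + 1 : Nat) : Int) := by push_cast; ring
    rw [hdropE]
    simp only [decode, List.headD_cons, List.tail_cons, specB]
    by_cases hc : c - E.getD t 0 < PySem.Int.floordiv p m
    · rw [if_pos hc, if_pos hc]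
      set c2 := c - E.getD t 0 with hc2
      set v := PySem.Int.floordiv p m - c2 with hv
      by_cases hk : 0 < k
      · rw [if_pos hk]
        obtain ⟨kn, hknk⟩ : ∃ kn : Nat, (kn : Int) = k :=
          ⟨k.toNat, Int.toNat_of_nonneg (le_of_lt hk)⟩
        have hkn1 : 1 ≤ kn := by omega
        have he : (t : Int) + k = ((t + kn : Nat) : Int) := by push_cast; omega
        have hE' : (if (t : Int) + k < (E.length : Int) then
              E.set ((t : Int) + k).toNat (PySem.List.pyGetD E ((t : Int) + k) 0 + v)
            else E) = E.set (t + kn) (E.getD (t + kn) 0 + v) := by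
          by_cases hin : (t : Int) + k < (E.length : Int)
          · rw [if_pos hin, he, PySem.List.pyGetD_natCast, Int.toNat_natCast]
          · rw [if_neg hin]
            rw [List.set_eq_of_length_le]
            have h9 : (E.length : Int) ≤ (t : Int) + k := by omega
            have h10 : (E.length : Int) ≤ ((t + kn : Nat) : Int) := by
              rw [Nat.cast_add, hknk]; exact h9
            exact_mod_cast h10
        rw [hE', hcast]
        rw [ih (t + 1) _ _ _ (by simp only [List.length_set]; simp only [List.length_cons] at h1; omega)]
        have hdset : (E.set (t + kn) (E.getD (t + kn) 0 + v)).drop (t + 1)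
            = (E.drop (t + 1)).set (kn - 1) ((E.drop (t + 1)).getD (kn - 1) 0 + v) := by
          have hgetD : E.getD (t + kn) 0 = (E.drop (t + 1)).getD (kn - 1) 0 := by
            rw [List.getD_eq_getElem?_getD, List.getD_eq_getElem?_getD, List.getElem?_drop]
            have : t + 1 + (kn - 1) = t + kn := by omega
            rw [this]
          have hidx : t + kn - (t + 1) = kn - 1 := by omega
          rw [List.drop_set, if_neg (by omega), hidx, hgetD]
        rw [hdset, decode_set_bump]
        have hkt : (k - 1).toNat = kn - 1 := by omega
        rw [hkt]
        ring
      · rw [if_neg hk, hcast]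
        rw [ih (t + 1) _ _ _ (by simp only [List.length_cons] at h1; omega)]
        have hkt : (k - 1).toNat = 0 := by omega
        rw [hkt]
        show _ = a + (v + specB m k ps (bump 0 v (decode c2 (E.drop (t + 1)))))
        rw [show bump 0 v (decode c2 (E.drop (t + 1))) = decode c2 (E.drop (t + 1)) from rfl]
        ring
    · rw [if_neg hc, if_neg hc]
      rw [hcast]
      rw [ih (t + 1) _ _ _ (by simp only [List.length_cons] at h1; omega)]

theorem tail_getD (cov : List Int) (j : Nat) (d : Int) :
    cov.tail.getD j d = cov.getD (j + 1) d := by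
  rw [getD_eq_headD_drop, getD_eq_headD_drop, ← List.drop_one, List.drop_drop, Nat.add_comm]

theorem specB_congr (m k : Int) (ps : List Int) : ∀ (cov cov' : List Int),
    cov.take ps.length = cov'.take ps.length → specB m k ps cov = specB m k ps cov' := by
  induction ps with
  | nil => intro _ _ _; rfl
  | cons p ps ih =>
    intro cov cov' h
    match cov, cov' with
    | [], [] => rfl
    | [], y :: ys => simp at h
    | x :: xs, [] => simp at h
    | x :: xs, y :: ys =>
      simp only [List.length_cons, List.take_succ_cons, List.cons.injEq] at h
      obtain ⟨hxy, ht⟩ := h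
      simp only [specB, List.headD_cons, List.tail_cons, hxy]
      by_cases hc : y < PySem.Int.floordiv p m
      · rw [if_pos hc, if_pos hc]
        have hb := ih (bump (k - 1).toNat (PySem.Int.floordiv p m - y) xs)
          (bump (k - 1).toNat (PySem.Int.floordiv p m - y) ys)
          (by rw [bump_take, bump_take, ht])
        rw [hb]
      · rw [if_neg hc, if_neg hc]
        exact ih _ _ ht

-- for k ≥ 0 the variable window of specA agrees with specB's constant one
theorem bridge_nonneg (m k : Int) (hk : 0 ≤ k) (n : Nat) (ps : List Int) :
    ∀ (t : Nat) (cov : List Int), n = t + ps.length → cov.length = ps.length →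
    specA m k n t ps cov = specB m k ps cov := by
  induction ps with
  | nil => intro t cov h1 h2; rfl
  | cons p ps ih =>
    intro t cov h1 h2
    obtain ⟨kn, hknk⟩ : ∃ kn : Nat, (kn : Int) = k := ⟨k.toNat, Int.toNat_of_nonneg hk⟩
    have hcl : PySem.List.clampIdx n ((t : Int) + k) = min (t + kn) n := by
      rw [← hknk, ← Nat.cast_add, PySem.List.clampIdx_natCast]
    have htl : cov.tail.length = ps.length := by
      rw [List.length_tail, h2]; simp
    have hkt : (k - 1).toNat = kn - 1 := by omega
    simp only [specA, specB, hcl, hkt]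
    by_cases hc : cov.headD 0 < PySem.Int.floordiv p m
    · rw [if_pos hc, if_pos hc]
      congr 1
      rcases Nat.le_total (t + kn) n with hle | hle
      · have hmin : min (t + kn) n = t + kn := min_eq_left hle
        have hcnt : t + kn - t - 1 = kn - 1 := by omega
        rw [hmin, hcnt]
        exact ih (t + 1) _ (by simp at h1 ⊢; omega) (by rw [bump_length]; exact htl)
      · have hmin : min (t + kn) n = n := min_eq_right hle
        rw [hmin]
        have hb1 : bump (n - t - 1) (PySem.Int.floordiv p m - cov.headD 0) cov.tail
            = cov.tail.map (· + (PySem.Int.floordiv p m - cov.headD 0)) := by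
          apply bump_all; simp at h1; omega
        have hb2 : bump (kn - 1) (PySem.Int.floordiv p m - cov.headD 0) cov.tail
            = cov.tail.map (· + (PySem.Int.floordiv p m - cov.headD 0)) := by
          apply bump_all; simp at h1; omega
        rw [hb1, hb2]
        exact ih (t + 1) _ (by simp at h1 ⊢; omega) (by rw [List.length_map]; exact htl)
    · rw [if_neg hc, if_neg hc]
      exact ih (t + 1) _ (by simp at h1 ⊢; omega) htl

theorem specB_zero (m k : Int) (hk : k ≤ 0) (ps : List Int) : ∀ (c : Nat),
    specB m k ps (List.replicate c 0) = needSum m ps := by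
  induction ps with
  | nil => intro c; rfl
  | cons p ps ih =>
    intro c
    have hh : ((List.replicate c (0 : Int)).headD 0) = 0 := by cases c <;> simp [List.replicate_succ]
    have htl : (List.replicate c (0 : Int)).tail = List.replicate (c - 1) 0 := by
      cases c <;> simp [List.replicate_succ]
    have hkt : (k - 1).toNat = 0 := by omega
    simp only [specB, needSum, hh, hkt, htl]
    by_cases hc : (0 : Int) < PySem.Int.floordiv p m
    · rw [if_pos hc, if_pos hc]
      rw [show bump 0 (PySem.Int.floordiv p m - 0) (List.replicate (c - 1) (0 : Int))
            = List.replicate (c - 1) 0 from rfl]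
      rw [ih]
      ring
    · rw [if_neg hc, if_neg hc, zero_add]
      exact ih (c - 1)

-- a clampIdx above t+1 at a negative offset means the stop index wrapped around
theorem clampIdx_neg_wrap (n t : Nat) (k : Int) (hk : k < 0)
    (h : t + 1 < PySem.List.clampIdx n ((t : Int) + k)) :
    (t : Int) + k < 0 ∧ ((PySem.List.clampIdx n ((t : Int) + k) : Nat) : Int) = n + t + k := by
  unfold PySem.List.clampIdx at h ⊢
  split_ifs at h ⊢ with h1 h2
  · omega
  · constructor
    · exact h1
    · rw [Int.toNat_of_nonneg (by omega)]; ring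
  · exfalso
    have : ((t : Int) + k).toNat < t := by omega
    omega

-- for k < 0 without a wrap-covered pair of positive demands, specA is the plain demand sum
theorem specA_neg (m k : Int) (hk : k < 0) (P : List Int)
    (hnp : ∀ i j : Nat, i < j → j < P.length → (i : Int) + k < 0 →
      (j : Int) - (i : Int) < (P.length : Int) + k →
      0 < PySem.Int.floordiv (P.getD i 0) m → ¬ 0 < PySem.Int.floordiv (P.getD j 0) m) :
    ∀ (ps : List Int) (t : Nat) (cov : List Int), P.drop t = ps → cov.length = ps.length →
      t + ps.length = P.length →
      (∀ j : Nat, 0 ≤ cov.getD j 0) →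
      (∀ j : Nat, j < cov.length → 0 < cov.getD j 0 →
        ¬ 0 < PySem.Int.floordiv (P.getD (t + j) 0) m) →
      specA m k P.length t ps cov = needSum m ps := by
  intro ps
  induction ps with
  | nil => intro t cov _ _ _ _ _; rfl
  | cons p ps ih =>
    intro t cov hdrop hlen hsum hnn hinv
    have hp : P.getD t 0 = p := by
      rw [getD_eq_headD_drop, hdrop]; rfl
    have hdrop' : P.drop (t + 1) = ps := by
      rw [← tail_drop', hdrop]; rfl
    have hlc : cov.length = ps.length + 1 := by simpa using hlen
    have hcur0 : 0 ≤ cov.headD 0 := by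
      have := hnn 0
      rwa [getD_eq_headD_drop, List.drop_zero] at this
    have hgetD0 : cov.getD 0 0 = cov.headD 0 := by
      rw [getD_eq_headD_drop, List.drop_zero]
    simp only [specA, needSum]
    by_cases hc : cov.headD 0 < PySem.Int.floordiv p m
    · rw [if_pos hc]
      have hreqpos : 0 < PySem.Int.floordiv p m := lt_of_le_of_lt hcur0 hc
      have hcur : cov.headD 0 = 0 := by
        by_contra hne
        have hpos : 0 < cov.getD 0 0 := by rw [hgetD0]; omega
        have := hinv 0 (by omega) hpos
        rw [Nat.add_zero, hp] at this
        exact this hreqpos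
      rw [if_pos hreqpos, hcur, sub_zero]
      congr 1
      have htl : cov.tail.length = ps.length := by rw [List.length_tail, hlc]; omega
      apply ih (t + 1) _ hdrop' (by rw [bump_length]; exact htl) (by simp only [List.length_cons] at hsum; omega)
      · intro j
        rw [bump_getD]
        split_ifs with hj
        · have h1 := hnn (j + 1)
          rw [tail_getD]
          omega
        · rw [tail_getD]
          exact hnn (j + 1)
      · intro j hjl hjpos
        rw [bump_length, htl] at hjl
        rw [bump_getD, tail_getD] at hjpos
        split_ifs at hjpos with hj
        · -- the entry was covered by the wrap-around slice: use the no-pair hypothesis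
          obtain ⟨hj1, hj2⟩ := hj
          have hwrap := clampIdx_neg_wrap P.length t k hk (by omega)
          obtain ⟨hneg, hval⟩ := hwrap
          apply hnp t (t + 1 + j) (by omega) (by omega) hneg
          · have hlt : t + 1 + j < PySem.List.clampIdx P.length ((t : Int) + k) := by omega
            have hlt' : ((t + 1 + j : Nat) : Int)
                < ((PySem.List.clampIdx P.length ((t : Int) + k) : Nat) : Int) := by
              exact_mod_cast hlt
            rw [hval] at hlt'
            push_cast at hlt' ⊢
            omega
          · rw [hp]; exact hreqpos
        · have := hinv (j + 1) (by omega) (by omega)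
          have hidx : t + (j + 1) = t + 1 + j := by omega
          rwa [hidx] at this
    · rw [if_neg hc]
      have hreqle : ¬ 0 < PySem.Int.floordiv p m := by
        intro hpos
        have hcpos : 0 < cov.getD 0 0 := by rw [hgetD0]; omega
        have := hinv 0 (by omega) hcpos
        rw [Nat.add_zero, hp] at this
        exact this hpos
      rw [if_neg hreqle, zero_add]
      have htl : cov.tail.length = ps.length := by rw [List.length_tail, hlc]; omega
      apply ih (t + 1) cov.tail hdrop' htl (by simp only [List.length_cons] at hsum; omega)
      · intro j
        rw [tail_getD]
        exact hnn (j + 1)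
      · intro j hjl hjpos
        rw [htl] at hjl
        rw [tail_getD] at hjpos
        have := hinv (j + 1) (by omega) hjpos
        have hidx : t + (j + 1) = t + 1 + j := by omega
        rwa [hidx] at this

-- ===== VERDICT (by name: the statement is the Claim_ definition above) =====
theorem clampIdx_neg_val (n t : Nat) (k : Int) (h1 : (t : Int) + k < 0) (h2 : 0 ≤ (n : Int) + t + k) :
    ((PySem.List.clampIdx n ((t : Int) + k) : Nat) : Int) = n + t + k := by
  unfold PySem.List.clampIdx
  rw [if_pos h1, if_neg (by omega), Int.toNat_of_nonneg (by omega)]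
  ring

-- A never buys more than the plain demand at any step (any k)
theorem specA_le (m k : Int) (n : Nat) (ps : List Int) : ∀ (t : Nat) (cov : List Int),
    (∀ j : Nat, 0 ≤ cov.getD j 0) → specA m k n t ps cov ≤ needSum m ps := by
  induction ps with
  | nil => intro t cov _; exact le_refl 0
  | cons p ps ih =>
    intro t cov hnn
    have hcur0 : 0 ≤ cov.headD 0 := by
      have := hnn 0
      rwa [getD_eq_headD_drop, List.drop_zero] at this
    have hnn' : ∀ j : Nat, 0 ≤ cov.tail.getD j 0 := by
      intro j; rw [tail_getD]; exact hnn (j + 1)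
    simp only [specA, needSum]
    by_cases hc : cov.headD 0 < PySem.Int.floordiv p m
    · rw [if_pos hc, if_pos (lt_of_le_of_lt hcur0 hc)]
      apply add_le_add (by omega)
      apply ih
      intro j
      rw [bump_getD]
      split_ifs with hj
      · have := hnn' j; omega
      · exact hnn' j
    · rw [if_neg hc]
      calc specA m k n (t + 1) ps cov.tail ≤ needSum m ps := ih (t + 1) cov.tail hnn'
        _ ≤ (if 0 < PySem.Int.floordiv p m then PySem.Int.floordiv p m else 0) + needSum m ps := by
            split_ifs with h <;> omega

-- for k < 0, a wrap-covered pair of positive demands makes A buy strictly less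
theorem specA_lt (m k : Int) (hk : k < 0) (P : List Int) :
    ∀ (ps : List Int) (t : Nat) (cov : List Int), P.drop t = ps → cov.length = ps.length →
      t + ps.length = P.length →
      (∀ j : Nat, 0 ≤ cov.getD j 0) →
      ((∃ j : Nat, j < cov.length ∧ 0 < cov.getD j 0 ∧
          0 < PySem.Int.floordiv (P.getD (t + j) 0) m) ∨
        (∃ i j : Nat, t ≤ i ∧ i < j ∧ j < P.length ∧ (i : Int) + k < 0 ∧
          (j : Int) - (i : Int) < (P.length : Int) + k ∧
          0 < PySem.Int.floordiv (P.getD i 0) m ∧ 0 < PySem.Int.floordiv (P.getD j 0) m)) →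
      specA m k P.length t ps cov < needSum m ps := by
  intro ps
  induction ps with
  | nil =>
    intro t cov _ hlen hsum _ hwit
    exfalso
    rcases hwit with ⟨j, hj, _, _⟩ | ⟨i, j, hti, hij, hjn, _, _, _, _⟩
    · rw [hlen] at hj; simp at hj
    · simp at hsum; omega
  | cons p ps ih =>
    intro t cov hdrop hlen hsum hnn hwit
    have hp : P.getD t 0 = p := by rw [getD_eq_headD_drop, hdrop]; rfl
    have hdrop' : P.drop (t + 1) = ps := by rw [← tail_drop', hdrop]; rfl
    have hlc : cov.length = ps.length + 1 := by simpa using hlen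
    have hsum' : t + 1 + ps.length = P.length := by simp at hsum; omega
    have htl : cov.tail.length = ps.length := by rw [List.length_tail, hlc]; omega
    have hgetD0 : cov.getD 0 0 = cov.headD 0 := by rw [getD_eq_headD_drop, List.drop_zero]
    have hcur0 : 0 ≤ cov.headD 0 := by have := hnn 0; rwa [hgetD0] at this
    have hnn' : ∀ j : Nat, 0 ≤ cov.tail.getD j 0 := by
      intro j; rw [tail_getD]; exact hnn (j + 1)
    simp only [specA, needSum]
    by_cases hbad0 : 0 < cov.headD 0 ∧ 0 < PySem.Int.floordiv p m
    · -- strictly cheaper at this very step, and never dearer later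
      obtain ⟨hb1, hb2⟩ := hbad0
      rw [if_pos hb2]
      by_cases hc : cov.headD 0 < PySem.Int.floordiv p m
      · rw [if_pos hc]
        apply add_lt_add_of_lt_of_le (by omega)
        apply specA_le
        intro j
        rw [bump_getD]
        split_ifs with hj
        · have := hnn' j; omega
        · exact hnn' j
      · rw [if_neg hc]
        calc specA m k P.length (t + 1) ps cov.tail ≤ needSum m ps :=
              specA_le m k P.length ps (t + 1) cov.tail hnn'
          _ < PySem.Int.floordiv p m + needSum m ps := by omega
    · rcases hwit with ⟨j, hjl, hjpos, hjfd⟩ | ⟨i, j, hti, hij, hjn, hik, hwin, hfi, hfj⟩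
      · -- a covered positive demand strictly ahead: it survives this step
        have hj1 : 1 ≤ j := by
          rcases Nat.eq_zero_or_pos j with h0 | h1
          · exfalso
            rw [h0, hgetD0] at hjpos
            rw [h0, Nat.add_zero, hp] at hjfd
            exact hbad0 ⟨hjpos, hjfd⟩
          · exact h1
        have hnext : ∃ j' : Nat, j' < cov.tail.length ∧ 0 < cov.tail.getD j' 0 ∧
            0 < PySem.Int.floordiv (P.getD (t + 1 + j') 0) m := by
          refine ⟨j - 1, by omega, ?_, ?_⟩
          · rw [tail_getD]
            have : j - 1 + 1 = j := by omega
            rw [this]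
            exact hjpos
          · have : t + 1 + (j - 1) = t + j := by omega
            rw [this]
            exact hjfd
        by_cases hc : cov.headD 0 < PySem.Int.floordiv p m
        · rw [if_pos hc, if_pos (lt_of_le_of_lt hcur0 hc)]
          apply add_lt_add_of_le_of_lt (by omega)
          apply ih (t + 1) _ hdrop' (by rw [bump_length]; exact htl) hsum'
          · intro j'
            rw [bump_getD]
            split_ifs with hj'
            · have := hnn' j'; omega
            · exact hnn' j'
          · left
            obtain ⟨j', h1, h2, h3⟩ := hnext
            refine ⟨j', by rw [bump_length]; exact h1, ?_, h3⟩
            rw [bump_getD]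
            split_ifs with hj'
            · have := hnn' j'; omega
            · exact h2
        · rw [if_neg hc]
          calc specA m k P.length (t + 1) ps cov.tail < needSum m ps :=
                ih (t + 1) cov.tail hdrop' htl hsum' hnn' (Or.inl hnext)
            _ ≤ (if 0 < PySem.Int.floordiv p m then PySem.Int.floordiv p m else 0)
                  + needSum m ps := by split_ifs with h <;> omega
      · rcases Nat.lt_or_ge t i with hti' | hti'
        · -- the pair is strictly ahead: pass it on
          have hstep : ∀ cov' : List Int, cov'.length = ps.length →
              (∀ j' : Nat, 0 ≤ cov'.getD j' 0) →
              specA m k P.length (t + 1) ps cov' < needSum m ps := by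
            intro cov' h1 h2
            exact ih (t + 1) cov' hdrop' h1 hsum' h2
              (Or.inr ⟨i, j, by omega, hij, hjn, hik, hwin, hfi, hfj⟩)
          by_cases hc : cov.headD 0 < PySem.Int.floordiv p m
          · rw [if_pos hc, if_pos (lt_of_le_of_lt hcur0 hc)]
            apply add_lt_add_of_le_of_lt (by omega)
            apply hstep _ (by rw [bump_length]; exact htl)
            intro j'
            rw [bump_getD]
            split_ifs with hj'
            · have := hnn' j'; omega
            · exact hnn' j'
          · rw [if_neg hc]
            calc specA m k P.length (t + 1) ps cov.tail < needSum m ps :=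
                  hstep cov.tail htl hnn'
              _ ≤ (if 0 < PySem.Int.floordiv p m then PySem.Int.floordiv p m else 0)
                    + needSum m ps := by split_ifs with h <;> omega
        · -- i = t: the purchase here wrap-covers position j
          have hit : i = t := by omega
          rw [hit] at hik hwin hfi
          rw [hp] at hfi
          have hcur : cov.headD 0 = 0 := by
            rcases lt_or_eq_of_le hcur0 with h | h
            · exact absurd ⟨h, hfi⟩ hbad0
            · omega
          have hc : cov.headD 0 < PySem.Int.floordiv p m := by omega
          rw [if_pos hc, if_pos hfi, hcur, sub_zero]
          apply add_lt_add_of_le_of_lt (le_refl _)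
          have hjt : t + 1 ≤ j := by omega
          have hclv : ((PySem.List.clampIdx P.length ((t : Int) + k) : Nat) : Int)
              = P.length + t + k := clampIdx_neg_val P.length t k hik (by push_cast at hwin ⊢; omega)
          have hjw : j - (t + 1) < PySem.List.clampIdx P.length ((t : Int) + k) - t - 1 := by
            have : ((j : Nat) : Int) < ((PySem.List.clampIdx P.length ((t : Int) + k) : Nat) : Int) := by
              rw [hclv]; push_cast at hwin ⊢; omega
            have hj' : j < PySem.List.clampIdx P.length ((t : Int) + k) := by exact_mod_cast this
            omega
          apply ih (t + 1) _ hdrop' (by rw [bump_length]; exact htl) hsum'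
          · intro j'
            rw [bump_getD]
            split_ifs with hj'
            · have := hnn' j'; omega
            · exact hnn' j'
          · left
            refine ⟨j - (t + 1), ?_, ?_, ?_⟩
            · rw [bump_length, htl]; omega
            · rw [bump_getD]
              rw [if_pos ⟨hjw, by rw [htl]; omega⟩]
              have := hnn' (j - (t + 1))
              omega
            · have : t + 1 + (j - (t + 1)) = j := by omega
              rw [this]
              exact hfj

theorem getD_replicate_zero (j c : Nat) : (List.replicate c (0 : Int)).getD j 0 = 0 := by
  rw [getD_eq_headD_drop, List.drop_replicate]
  cases c - j <;> simp [List.replicate_succ]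

theorem solution_spec : Claim_unchanged_solution := by
  unfold Claim_unchanged_solution
  intro players m k _ _
  unfold Spec_solution
  intro hnd
  unfold solution solution_alt
  have hA := A_loop m k players.length players 0 0 (List.replicate players.length 0)
    (by simp) (by simp)
  simp only [Nat.cast_zero, List.drop_zero, zero_add] at hA
  rw [hA]
  have hB := B_loop m k players 0 0 0 (List.replicate (players.length + 1) 0) (by simp)
  simp only [Nat.cast_zero, List.drop_zero, zero_add, decode_replicate] at hB
  rw [hB]
  by_cases hk : 0 ≤ k
  · rw [bridge_nonneg m k hk players.length players 0 (List.replicate players.length 0)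
      (by simp) (by simp)]
    apply specB_congr
    rw [List.take_replicate, List.take_replicate]
    congr 1
    omega
  · push_neg at hk
    unfold D_solution at hnd
    have hnp : ∀ i j : Nat, i < j → j < players.length → (i : Int) + k < 0 →
        (j : Int) - (i : Int) < (players.length : Int) + k →
        0 < PySem.Int.floordiv (players.getD i 0) m →
        ¬ 0 < PySem.Int.floordiv (players.getD j 0) m := by
      intro i j hij hjl hik hwin hpi hpj
      exact hnd ⟨hk, i, Nat.lt_trans hij hjl, j, hjl, hij, hik, hwin, hpi, hpj⟩
    rw [specA_neg m k hk players hnp players 0 (List.replicate players.length 0)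
      (by simp) (by simp) (by simp)
      (by intro j; rw [getD_replicate_zero])
      (by intro j _ hj; rw [getD_replicate_zero] at hj; exact absurd hj (lt_irrefl 0))]
    rw [specB_zero m k (le_of_lt hk)]

theorem solution_changed : Claim_changed_solution := by unfold Claim_changed_solution; decide

theorem solution_tight : Claim_exact_solution := by
  unfold Claim_exact_solution
  intro players m k _ _ hd
  unfold D_solution at hd
  obtain ⟨hk, i, hin, j, hjn, hij, hik, hwin, hfi, hfj⟩ := hd
  unfold solution solution_alt
  have hA := A_loop m k players.length players 0 0 (List.replicate players.length 0)
    (by simp) (by simp)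
  simp only [Nat.cast_zero, List.drop_zero, zero_add] at hA
  rw [hA]
  have hB := B_loop m k players 0 0 0 (List.replicate (players.length + 1) 0) (by simp)
  simp only [Nat.cast_zero, List.drop_zero, zero_add, decode_replicate] at hB
  rw [hB, specB_zero m k (le_of_lt hk)]
  apply ne_of_lt
  apply specA_lt m k hk players players 0 (List.replicate players.length 0)
    (by simp) (by simp) (by simp)
    (by intro j'; rw [getD_replicate_zero])
    (Or.inr ⟨i, j, Nat.zero_le i, hij, hjn, hik, hwin, hfi, hfj⟩)
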